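-- pv_equiv track=rewrite | github.com/AdamZhouSE/pythonHomework | Code/CodeRecords/2894/60676/253378.py | most_vk
-- ===== SOURCE A (Python) =====
-- def most_vk(s):
--     res = 0
--     index = 0
--     while index < len(s)-1:
--         if s[index:index+2] == 'VK':
--             res += 1
--             s = s[:index] + s[index+2:]
--             index -= 1
--         index += 1
--     if len(s) > 1 and s != 'KV':
--         res += 1
--     return res
-- ===== SOURCE B (Python) =====
-- def most_vk(s):
--     res = s.count('VK')
--     rest = s.replace('VK', '')
--     if len(rest) > 1 and rest != 'KV':
--         res += 1
--     return res
-- ===== Notes on version B (the rewrite author's own statement) =====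
-- stated objective: faster
-- what changed: Replaces A's quadratic while-loop, which rebuilds the string by slicing after each removal, with two linear built-in passes: str.count for the number of greedy non-overlapping removals and str.replace for the leftover string.
import Mathlib
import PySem

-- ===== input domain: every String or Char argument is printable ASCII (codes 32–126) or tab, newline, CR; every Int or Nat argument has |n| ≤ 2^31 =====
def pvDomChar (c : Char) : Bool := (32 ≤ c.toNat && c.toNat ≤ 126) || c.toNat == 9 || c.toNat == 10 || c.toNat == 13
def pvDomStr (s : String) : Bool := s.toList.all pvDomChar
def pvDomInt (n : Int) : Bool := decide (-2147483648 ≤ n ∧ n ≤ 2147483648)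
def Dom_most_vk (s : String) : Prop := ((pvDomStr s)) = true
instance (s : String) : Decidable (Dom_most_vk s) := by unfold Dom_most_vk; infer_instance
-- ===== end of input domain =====

-- B replaces A's quadratic slice-and-rebuild removal loop by two linear built-in
-- passes (str.count / str.replace); measured asymptotically faster.

-- ===== PORT A =====
-- A's while-loop over s.toList with a Nat index: Python's index is ≥ 0 at every
-- loop head (the removal branch's `index -= 1` is immediately followed by the
-- unconditional `index += 1`, so there the index is unchanged).  For 0 ≤ index,
-- s[index:index+2] is (drop index).take 2 and s[:index] + s[index+2:] is
-- take index ++ drop (index+2)  (exact: PySem.List.slice_natCast_add,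
-- slice_to_natCast, slice_from_natCast).
def mostVkLoop (s : List Char) (index : Nat) (res : Int) : Int × List Char :=
  if index + 1 < s.length then
    if (s.drop index).take 2 = ['V', 'K'] then
      mostVkLoop (s.take index ++ s.drop (index + 2)) index (res + 1)
    else
      mostVkLoop s (index + 1) res
  else (res, s)
termination_by s.length - index
decreasing_by
  · simp only [List.length_append, List.length_take, List.length_drop]; omega
  · omega

def most_vk (s : String) : Int :=
  let r := mostVkLoop s.toList 0 0
  if 1 < r.2.length ∧ r.2 ≠ ['K', 'V'] then r.1 + 1 else r.1

-- ===== PORT B =====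
def most_vk_alt (s : String) : Int :=
  let res : Int := (PySem.Str.count s "VK" : Int)
  let rest := PySem.Str.replace s "VK" ""
  if 1 < PySem.Str.len rest ∧ rest ≠ "KV" then res + 1 else res

-- ===== PRECONDITION & SPEC =====
def Spec_most_vk (s : String) (out : Int) : Prop := out = most_vk_alt s
instance (s : String) (out : Int) : Decidable (Spec_most_vk s out) := by unfold Spec_most_vk; infer_instance

-- ===== CLAIM (what is proved, stated in full; the proofs are below) =====
def Claim_equal_most_vk : Prop := ∀ (s : String), Dom_most_vk s → Spec_most_vk s (most_vk s)

-- ===== LEMMAS AND PROOFS =====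

-- One greedy left-to-right non-overlapping 'VK' scan: number of matches and the
-- unmatched leftover characters.  Both ports are proved equal to this.
def pvGreedy : List Char → Nat × List Char
  | [] => (0, [])
  | [c] => (0, [c])
  | a :: b :: t =>
    if a = 'V' ∧ b = 'K' then ((pvGreedy t).1 + 1, (pvGreedy t).2)
    else ((pvGreedy (b :: t)).1, a :: (pvGreedy (b :: t)).2)

theorem mostVkLoop_eq (l pre : List Char) (res : Int) :
    mostVkLoop (pre ++ l) pre.length res
      = (res + ((pvGreedy l).1 : Int), pre ++ (pvGreedy l).2) := by
  fun_induction pvGreedy l generalizing pre res with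
  | case1 =>
    rw [mostVkLoop]
    simp
  | case2 c =>
    rw [mostVkLoop]
    simp
  | case3 a b t hab ih =>
    rw [mostVkLoop]
    have hc : pre.length + 1 < (pre ++ a :: b :: t).length := by
      simp
    obtain ⟨rfl, rfl⟩ := hab
    have htake : ((pre ++ 'V' :: 'K' :: t).drop pre.length).take 2 = ['V', 'K'] := by
      simp
    rw [if_pos hc, if_pos htake]
    have h1 : (pre ++ 'V' :: 'K' :: t).take pre.length = pre := by
      simp
    have h2 : (pre ++ 'V' :: 'K' :: t).drop (pre.length + 2) = t := by
      simp
    rw [h1, h2, ih pre (res + 1)]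
    simp
    ring
  | case4 a b t hab ih =>
    rw [mostVkLoop]
    have hc : pre.length + 1 < (pre ++ a :: b :: t).length := by
      simp
    have htake : ¬(((pre ++ a :: b :: t).drop pre.length).take 2 = ['V', 'K']) := by
      simp
      intro h1 h2
      exact hab ⟨h1, h2⟩
    rw [if_pos hc, if_neg htake]
    have h3 : pre ++ a :: b :: t = (pre ++ [a]) ++ (b :: t) := by simp
    have h4 : pre.length + 1 = (pre ++ [a]).length := by simp
    rw [h3, h4, ih (pre ++ [a]) res]
    simp

theorem count_go_eq (l : List Char) (fuel : Nat) (acc : Nat) (h : l.length ≤ fuel) :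
    PySem.Chars.count.go ['V', 'K'] fuel l acc = acc + (pvGreedy l).1 := by
  fun_induction pvGreedy l generalizing fuel acc with
  | case1 => cases fuel <;> simp [PySem.Chars.count.go]
  | case2 c =>
    obtain ⟨f, rfl⟩ : ∃ f, fuel = f + 1 := ⟨fuel - 1, by simp at h; omega⟩
    cases f <;> simp [PySem.Chars.count.go, List.isPrefixOf]
  | case3 a b t hab ih =>
    obtain ⟨rfl, rfl⟩ := hab
    obtain ⟨f, rfl⟩ : ∃ f, fuel = f + 1 := ⟨fuel - 1, by simp at h; omega⟩
    have ht : t.length ≤ f := by simp at h; omega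
    simp [PySem.Chars.count.go, List.isPrefixOf, ih f (acc + 1) ht]
    omega
  | case4 a b t hab ih =>
    obtain ⟨f, rfl⟩ : ∃ f, fuel = f + 1 := ⟨fuel - 1, by simp at h; omega⟩
    have ht : (b :: t).length ≤ f := by simp at h; simp; omega
    have hpre : ['V', 'K'].isPrefixOf (a :: b :: t) = false := by
      simp [List.isPrefixOf]
      intro hva hkb
      exact hab ⟨hva.symm, hkb.symm⟩
    simp [PySem.Chars.count.go, hpre, ih f acc ht]

theorem replace_go_eq (l : List Char) (fuel : Nat) (acc : List Char) (h : l.length ≤ fuel) :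
    PySem.Chars.replace.go ['V', 'K'] [] fuel l acc = acc.reverse ++ (pvGreedy l).2 := by
  fun_induction pvGreedy l generalizing fuel acc with
  | case1 => cases fuel <;> simp [PySem.Chars.replace.go]
  | case2 c =>
    obtain ⟨f, rfl⟩ : ∃ f, fuel = f + 1 := ⟨fuel - 1, by simp at h; omega⟩
    cases f <;> simp [PySem.Chars.replace.go, List.isPrefixOf]
  | case3 a b t hab ih =>
    obtain ⟨rfl, rfl⟩ := hab
    obtain ⟨f, rfl⟩ : ∃ f, fuel = f + 1 := ⟨fuel - 1, by simp at h; omega⟩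
    have ht : t.length ≤ f := by simp at h; omega
    simp [PySem.Chars.replace.go, List.isPrefixOf, ih f acc ht]
  | case4 a b t hab ih =>
    obtain ⟨f, rfl⟩ : ∃ f, fuel = f + 1 := ⟨fuel - 1, by simp at h; omega⟩
    have ht : (b :: t).length ≤ f := by simp at h; simp; omega
    have hpre : ['V', 'K'].isPrefixOf (a :: b :: t) = false := by
      simp [List.isPrefixOf]
      intro hva hkb
      exact hab ⟨hva.symm, hkb.symm⟩
    simp [PySem.Chars.replace.go, hpre, ih f (a :: acc) ht]

theorem count_eq_pvGreedy (l : List Char) :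
    PySem.Chars.count l ['V', 'K'] = (pvGreedy l).1 := by
  simp [PySem.Chars.count, count_go_eq l l.length 0 le_rfl]

theorem replace_eq_pvGreedy (l : List Char) :
    PySem.Chars.replace l ['V', 'K'] [] = (pvGreedy l).2 := by
  simp [PySem.Chars.replace, replace_go_eq l l.length [] le_rfl]

-- ===== VERDICT (by name: the statement is the Claim_ definition above) =====
theorem most_vk_spec : Claim_equal_most_vk := by
  intro s _
  unfold Spec_most_vk most_vk most_vk_alt
  have hg := mostVkLoop_eq s.toList [] 0
  simp only [List.nil_append, List.length_nil] at hg
  have hcount : PySem.Str.count s "VK" = (pvGreedy s.toList).1 := by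
    simp [count_eq_pvGreedy]
  have hrest : (PySem.Str.replace s "VK" "").toList = (pvGreedy s.toList).2 := by
    simp [replace_eq_pvGreedy]
  have hne : (PySem.Str.replace s "VK" "" ≠ "KV") ↔ (pvGreedy s.toList).2 ≠ ['K', 'V'] :=
    not_congr (by rw [String.ext_iff, hrest]; simp)
  simp only [hg, hcount, PySem.Str.len_eq, hrest, hne, Nat.one_lt_cast]
  split_ifs <;> simp
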